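-- pv_equiv track=rewrite | github.com/sukumarbarman/goastrion-v1 | goastrion-backend/astro/domain/rules.py | _quality_from_houses
-- ===== SOURCE A (Python) =====
-- from typing import Dict, List, Tuple, Any, Set, Optional, Iterable, Union
--
-- _KENDRA = {1, 4, 7, 10}
--
-- _TRIKONA = {1, 5, 9}
--
-- _UPACHAYA = {3, 6, 10, 11}
--
-- _DUSTHANA = {6, 8, 12}
--
-- def _quality_from_houses(houses: List[int]) -> str:
--     """
--     Crude strength label from house placements.
--     'excellent' (kendra/trikona presence), 'good' (upachaya), 'poor' (dusthana), 'neutral' otherwise.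
--     """
--     if any(h in _KENDRA or h in _TRIKONA for h in houses):
--         return "excellent"
--     if any(h in _UPACHAYA for h in houses):
--         return "good"
--     if any(h in _DUSTHANA for h in houses):
--         return "poor"
--     return "neutral"
-- ===== SOURCE B (Python) =====
-- _KENDRA = {1, 4, 7, 10}
-- _TRIKONA = {1, 5, 9}
-- _UPACHAYA = {3, 6, 10, 11}
-- _DUSTHANA = {6, 8, 12}
--
-- def _quality_from_houses(houses):
--     has_good = False
--     has_poor = False
--     for h in houses:
--         if h in _KENDRA or h in _TRIKONA:
--             return "excellent"
--         if h in _UPACHAYA: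
--             has_good = True
--         if h in _DUSTHANA:
--             has_poor = True
--     if has_good:
--         return "good"
--     if has_poor:
--         return "poor"
--     return "neutral"
-- ===== Notes on version B (the rewrite author's own statement) =====
-- stated objective: alternative
-- what changed: Replaced A's three sequential any(...) scans over the list by a single pass that early-returns on a kendra/trikona hit and accumulates has_good/has_poor flags, deciding the label once after the loop.
import Mathlib
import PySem

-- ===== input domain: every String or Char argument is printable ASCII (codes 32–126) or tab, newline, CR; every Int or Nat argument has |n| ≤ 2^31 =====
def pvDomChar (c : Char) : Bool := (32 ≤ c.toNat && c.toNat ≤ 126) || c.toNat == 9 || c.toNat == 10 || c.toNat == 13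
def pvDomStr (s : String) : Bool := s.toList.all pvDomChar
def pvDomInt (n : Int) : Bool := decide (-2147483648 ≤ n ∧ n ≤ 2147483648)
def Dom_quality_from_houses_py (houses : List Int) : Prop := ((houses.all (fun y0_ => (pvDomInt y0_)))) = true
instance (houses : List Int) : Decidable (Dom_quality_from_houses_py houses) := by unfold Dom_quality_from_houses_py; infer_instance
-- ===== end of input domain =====

-- B replaces A's three any(...) scans with one pass keeping has_good/has_poor flags (alternative decomposition, same cost).

-- membership tests for the module-level house sets (shared constants of both Pythons)
def inKendra (h : Int) : Bool := h == 1 || h == 4 || h == 7 || h == 10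
def inTrikona (h : Int) : Bool := h == 1 || h == 5 || h == 9
def inUpachaya (h : Int) : Bool := h == 3 || h == 6 || h == 10 || h == 11
def inDusthana (h : Int) : Bool := h == 6 || h == 8 || h == 12

-- ===== PORT A =====
def quality_from_houses_py (houses : List Int) : String :=
  if houses.any (fun h => inKendra h || inTrikona h) then "excellent"
  else if houses.any (fun h => inUpachaya h) then "good"
  else if houses.any (fun h => inDusthana h) then "poor"
  else "neutral"

-- ===== PORT B =====
-- single pass: early return on kendra/trikona, accumulate the two flags
def qualityGo : List Int → Bool → Bool → String
  | [], hasGood, hasPoor =>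
      if hasGood then "good" else if hasPoor then "poor" else "neutral"
  | h :: t, hasGood, hasPoor =>
      if inKendra h || inTrikona h then "excellent"
      else qualityGo t (hasGood || inUpachaya h) (hasPoor || inDusthana h)

def quality_from_houses_py_alt (houses : List Int) : String :=
  qualityGo houses false false

-- ===== PRECONDITION & SPEC =====
def Spec_quality_from_houses_py (houses : List Int) (out : String) : Prop := out = quality_from_houses_py_alt houses
instance (houses : List Int) (out : String) : Decidable (Spec_quality_from_houses_py houses out) := by unfold Spec_quality_from_houses_py; infer_instance

-- ===== CLAIM (what is proved, stated in full; the proofs are below) =====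
def Claim_equal_quality_from_houses_py : Prop := ∀ (houses : List Int), Dom_quality_from_houses_py houses → Spec_quality_from_houses_py houses (quality_from_houses_py houses)

-- ===== LEMMAS AND PROOFS =====
-- loop invariant: qualityGo with flags g,p equals the three-scan result seeded with g,p
theorem qualityGo_eq (houses : List Int) : ∀ (g p : Bool),
    qualityGo houses g p =
      if houses.any (fun h => inKendra h || inTrikona h) then "excellent"
      else if g || houses.any (fun h => inUpachaya h) then "good"
      else if p || houses.any (fun h => inDusthana h) then "poor"
      else "neutral" := by
  induction houses with
  | nil => intro g p; simp [qualityGo]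
  | cons h t ih =>
      intro g p
      by_cases hk : (inKendra h || inTrikona h) = true
      · simp [qualityGo, hk]
      · simp only [qualityGo, hk, ih, List.any_cons]
        simp only [Bool.or_eq_true] at hk ⊢
        by_cases hu : inUpachaya h = true <;> by_cases hd : inDusthana h = true <;>
          simp [hu, hd]

-- ===== VERDICT (by name: the statement is the Claim_ definition above) =====
theorem quality_from_houses_py_spec : Claim_equal_quality_from_houses_py := by
  intro houses _
  unfold Spec_quality_from_houses_py quality_from_houses_py quality_from_houses_py_alt
  rw [qualityGo_eq]
  simp
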